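-- pv_equiv track=rewrite | github.com/miczho/competitive-coding | src/uber_09-29-24_3.py | dropBlock2
-- ===== SOURCE A (Python) =====
-- def dropBlock2(board):
--     """
--     Time complexity:
--     O(m * n^2) worst case (top half of the board is all '*')
--     """
--     n, m = len(board), len(board[0])
--     move = 0
--     result = 0
--
--     for i in reversed(range(n)):
--         move += 1
--         if "*" in board[i]:
--             break
--
--     for i in range(n):
--         for j in range(m):
--             if board[i][j] != "*":
--                 continue
--
--             for ii in range(i, i + move):
--                 if board[ii][j] != "#":
--                     continue
--
--                 board[ii][j] = "."
--                 result += 1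
--
--     return result
-- ===== SOURCE B (Python) =====
-- def dropBlock2(board):
--     """Per-column single pass tracking the most recent '*' row, counting
--     '#' cells within the drop window. Does not mutate board (the original
--     clears counted '#' cells to '.'); the return value is identical."""
--     n, m = len(board), len(board[0])
--     last_star_row = -1
--     for i, row in enumerate(board):
--         if "*" in row:
--             last_star_row = i
--     move = n - last_star_row if last_star_row >= 0 else n
--     result = 0
--     for j in range(m):
--         last = -1
--         for r in range(n):
--             c = board[r][j]
--             if c == "*":
--                 last = r
--             elif c == "#" and last >= 0 and r - last < move:
--                 result += 1
--     return result
-- ===== Notes on version B (the rewrite author's own statement) =====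
-- stated objective: alternative
-- what changed: Replaces A's mutation-based triple loop (for every '*' cell rescan its whole drop window, clearing '#' cells in place) with a non-mutating per-column single pass that tracks the most recent '*' row and counts '#' cells whose distance to it is below the move window.
import Mathlib
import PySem

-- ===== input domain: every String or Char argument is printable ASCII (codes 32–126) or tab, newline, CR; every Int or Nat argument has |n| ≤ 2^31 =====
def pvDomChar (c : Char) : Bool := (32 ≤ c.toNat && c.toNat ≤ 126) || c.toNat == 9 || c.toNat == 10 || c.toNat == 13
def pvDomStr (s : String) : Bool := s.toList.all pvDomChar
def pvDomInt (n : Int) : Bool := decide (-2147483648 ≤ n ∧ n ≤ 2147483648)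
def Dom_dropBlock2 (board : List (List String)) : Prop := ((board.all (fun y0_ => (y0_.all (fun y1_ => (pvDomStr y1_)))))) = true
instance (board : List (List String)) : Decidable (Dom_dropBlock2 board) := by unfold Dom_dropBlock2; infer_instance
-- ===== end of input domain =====

-- B replaces A's mutation-based triple loop by a non-mutating per-column single pass
-- tracking the most recent '*' row; A mutates its argument (clears counted '#' cells
-- to '.'), B does not — the equivalence proved here is about the return value only.

-- ===== PORT A =====
-- board[i][j] read; Python raises IndexError out of range — Pre_ excludes that, the "" default is never hit inside Pre_
def cellA (bd : List (List String)) (i j : Nat) : String := (bd.getD i []).getD j ""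

-- `for i in reversed(range(n)): move += 1; if "*" in board[i]: break`
def moveLoopA (bd : List (List String)) : List Nat → Nat → Nat
  | [], move => move
  | i :: rest, move =>
    if "*" ∈ bd.getD i [] then move + 1 else moveLoopA bd rest (move + 1)

-- `for ii in range(i, i+move): if board[ii][j] != "#": continue; board[ii][j] = "."; result += 1`
def innerA (j : Nat) : List Nat → List (List String) → Int → List (List String) × Int
  | [], bd, res => (bd, res)
  | ii :: rest, bd, res =>
    if cellA bd ii j ≠ "#" then innerA j rest bd res
    else innerA j rest (bd.set ii ((bd.getD ii []).set j ".")) (res + 1)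

-- `for j in range(m): if board[i][j] != "*": continue; <inner loop>`
def jLoopA (i w : Nat) : List Nat → List (List String) → Int → List (List String) × Int
  | [], bd, res => (bd, res)
  | j :: rest, bd, res =>
    if cellA bd i j ≠ "*" then jLoopA i w rest bd res
    else
      let p := innerA j (List.range' i w) bd res
      jLoopA i w rest p.1 p.2

-- `for i in range(n): <j loop>`
def iLoopA (w m : Nat) : List Nat → List (List String) → Int → List (List String) × Int
  | [], bd, res => (bd, res)
  | i :: rest, bd, res =>
    let p := jLoopA i w (List.range m) bd res
    iLoopA w m rest p.1 p.2

def dropBlock2 (board : List (List String)) : Int :=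
  let n := board.length
  let m := (board.headD []).length
  let w := moveLoopA board (List.range n).reverse 0
  (iLoopA w m (List.range n) board 0).2

-- ===== PORT B =====
-- `for i, row in enumerate(board): if "*" in row: last_star_row = i`
def lastStarB : List (Int × List String) → Int → Int
  | [], last => last
  | p :: rest, last => lastStarB rest (if "*" ∈ p.2 then p.1 else last)

-- `for r in range(n): c = board[r][j]; if c == "*": last = r; elif c == "#" and last >= 0 and r - last < move: result += 1`
def colLoopB (bd : List (List String)) (move : Int) (j : Nat) : List Nat → Int → Int → Int
  | [], _, res => res
  | r :: rest, last, res =>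
    let c := (bd.getD r []).getD j ""
    if c = "*" then colLoopB bd move j rest (r : Int) res
    else if c = "#" ∧ 0 ≤ last ∧ (r : Int) - last < move then colLoopB bd move j rest last (res + 1)
    else colLoopB bd move j rest last res

-- `for j in range(m): <column pass>`
def jLoopB (bd : List (List String)) (move : Int) (n : Nat) : List Nat → Int → Int
  | [], res => res
  | j :: rest, res => jLoopB bd move n rest (colLoopB bd move j (List.range n) (-1) res)

def dropBlock2_alt (board : List (List String)) : Int :=
  let n := board.length
  let m := (board.headD []).length
  let ls := lastStarB (PySem.List.enumerate board 0) (-1)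
  let move := if 0 ≤ ls then (n : Int) - ls else (n : Int)
  jLoopB board move n (List.range m) 0

-- ===== PRECONDITION & SPEC =====
-- Pre_ excludes exactly the inputs where Python A raises IndexError: the empty board
-- (board[0]) and ragged boards with a row shorter than row 0 (board[i][j] is read for
-- every i < n, j < len(board[0])).
def Pre_dropBlock2 (board : List (List String)) : Prop :=
  board ≠ [] ∧ ∀ row ∈ board, (board.headD []).length ≤ row.length
instance (board : List (List String)) : Decidable (Pre_dropBlock2 board) := by unfold Pre_dropBlock2; infer_instance

def pvWitness_dropBlock2 : List (List String) := [["*", "#"], ["#", "."]]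

def Spec_dropBlock2 (board : List (List String)) (out : Int) : Prop := out = dropBlock2_alt board
instance (board : List (List String)) (out : Int) : Decidable (Spec_dropBlock2 board out) := by unfold Spec_dropBlock2; infer_instance

-- ===== CLAIM (what is proved, stated in full; the proofs are below) =====
def Claim_equal_dropBlock2 : Prop := ∀ (board : List (List String)), Dom_dropBlock2 board → Pre_dropBlock2 board → Spec_dropBlock2 board (dropBlock2 board)

-- ===== LEMMAS AND PROOFS =====

-- the cleared-set predicate: cell r in column f is '#' and some processed '*' row in pl reaches it
def pdB (f : Nat → String) (w : Nat) (pl : List Nat) (r : Nat) : Bool :=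
  f r == "#" && pl.any (fun i => f i == "*" && decide (i ≤ r) && decide (r < i + w))

-- column state after clearing every cell of the cleared set of pl
def clF (f : Nat → String) (w : Nat) (pl : List Nat) : Nat → String :=
  fun r => if pdB f w pl r then "." else f r

-- one i-step of A restricted to one column, as a pure function, and its count
def stepCell (i w : Nat) (f : Nat → String) : Nat → String :=
  fun r => if f i = "*" ∧ r ∈ List.range' i w ∧ f r = "#" then "." else f r
def stepCnt (i w : Nat) (f : Nat → String) : Int :=
  if f i = "*" then (((List.range' i w).filter (fun r => f r = "#")).length : Int) else 0

-- A's i-loop projected to one column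
def colRun (w : Nat) : List Nat → (Nat → String) → (Nat → String)
  | [], f => f
  | i :: rest, f => colRun w rest (stepCell i w f)
def colCnt (w : Nat) : List Nat → (Nat → String) → Int
  | [], _ => 0
  | i :: rest, f => stepCnt i w f + colCnt w rest (stepCell i w f)

-- B's counted predicate for one column
def qB (bd : List (List String)) (move : Int) (j : Nat) (r : Nat) : Bool :=
  cellA bd r j == "#" && (List.range (r + 1)).any (fun i => cellA bd i j == "*" && decide ((r : Int) - i < move))

-- B side invariant: the running `last` is the most recent '*' row before k
def invB (bd : List (List String)) (j : Nat) (last : Int) (k : Nat) : Prop :=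
  (last = -1 ∧ ∀ i < k, cellA bd i j ≠ "*")
  ∨ (∃ i0, i0 < k ∧ cellA bd i0 j = "*" ∧ last = (i0 : Int) ∧ ∀ i, i0 < i → i < k → cellA bd i j ≠ "*")

lemma cellA_big (bd : List (List String)) (r j : Nat) (h : bd.length ≤ r) : cellA bd r j = "" := by
  simp [cellA, List.getD, List.getElem?_eq_none (by omega : bd.length ≤ r)]

lemma cellA_hash_lt (bd : List (List String)) (r j : Nat) (h : cellA bd r j = "#") : r < bd.length := by
  by_contra hc
  rw [cellA_big bd r j (by omega)] at h
  simp at h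

theorem chain_eq_of_mem_iff : ∀ (l1 l2 : List Nat), l1.Pairwise (· < ·) → l2.Pairwise (· < ·) →
    (∀ x, x ∈ l1 ↔ x ∈ l2) → l1 = l2
  | [], [], _, _, _ => rfl
  | [], b :: t2, _, _, h => absurd ((h b).2 (by simp)) (by simp)
  | a :: t1, [], _, _, h => absurd ((h a).1 (by simp)) (by simp)
  | a :: t1, b :: t2, h1, h2, h => by
    have hab : a = b := by
      have ha := (h a).1 (by simp)
      have hb := (h b).2 (by simp)
      rcases List.mem_cons.1 ha with h' | h'
      · exact h'
      · rcases List.mem_cons.1 hb with h'' | h''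
        · omega
        · have := (List.pairwise_cons.1 h1).1 b h''
          have := (List.pairwise_cons.1 h2).1 a h'
          omega
    subst hab
    have ht : ∀ x, x ∈ t1 ↔ x ∈ t2 := by
      intro x
      constructor
      · intro hx
        have hlt := (List.pairwise_cons.1 h1).1 x hx
        rcases List.mem_cons.1 ((h x).1 (List.mem_cons_of_mem _ hx)) with h' | h'
        · omega
        · exact h'
      · intro hx
        have hlt := (List.pairwise_cons.1 h2).1 x hx
        rcases List.mem_cons.1 ((h x).2 (List.mem_cons_of_mem _ hx)) with h' | h'
        · omega
        · exact h'
    rw [chain_eq_of_mem_iff t1 t2 (List.pairwise_cons.1 h1).2 (List.pairwise_cons.1 h2).2 ht]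

lemma pdB_hash {f : Nat → String} {w : Nat} {pl : List Nat} {r : Nat} (h : pdB f w pl r = true) :
    f r = "#" := by
  unfold pdB at h; simp at h; exact h.1
lemma pdB_append (f : Nat → String) (w : Nat) (pl l2 : List Nat) (r : Nat) :
    pdB f w (pl ++ l2) r = (pdB f w pl r || pdB f w l2 r) := by
  simp [pdB, List.any_append, Bool.and_or_distrib_left]
lemma pdB_single (f : Nat → String) (w : Nat) (i r : Nat) :
    pdB f w [i] r = (f r == "#" && f i == "*" && decide (i ≤ r) && decide (r < i + w)) := by
  simp [pdB, Bool.and_assoc]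
lemma clF_star_iff (f : Nat → String) (w : Nat) (pl : List Nat) (i : Nat) :
    (clF f w pl i = "*") ↔ f i = "*" := by
  unfold clF
  by_cases hp : pdB f w pl i = true
  · simp [hp, pdB_hash hp]
  · simp [hp]

lemma length_filter_disjoint {α : Type} (l : List α) (p q s : α → Bool)
    (h : ∀ x ∈ l, (s x = true ↔ (p x = true ∨ q x = true)) ∧ ¬(p x = true ∧ q x = true)) :
    (l.filter s).length = (l.filter p).length + (l.filter q).length := by
  induction l with
  | nil => simp
  | cons a t ih =>
    have ha := h a (by simp)
    have ht := ih (fun x hx => h x (List.mem_cons_of_mem _ hx))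
    by_cases hp : p a = true
    · have hq : ¬ q a = true := fun hh => ha.2 ⟨hp, hh⟩
      have hs : s a = true := ha.1.2 (Or.inl hp)
      simp [hp, hq, hs, ht]; omega
    · by_cases hq : q a = true
      · have hs : s a = true := ha.1.2 (Or.inr hq)
        simp [hp, hq, hs, ht]; omega
      · have hs : ¬ s a = true := fun hh => by rcases ha.1.1 hh with h' | h' <;> tauto
        simp [hp, hq, hs, ht]

lemma stepCell_clF (i w : Nat) (f : Nat → String) (pl : List Nat) :
    stepCell i w (clF f w pl) = clF f w (pl ++ [i]) := by
  funext r
  simp only [stepCell]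
  by_cases hstar : f i = "*"
  · by_cases hpr : pdB f w pl r = true
    · have hdot : clF f w pl r = "." := by simp [clF, hpr]
      have h2 : pdB f w (pl ++ [i]) r = true := by rw [pdB_append, hpr]; simp
      rw [if_neg (fun hc => by simp [hdot] at hc)]
      rw [hdot]; simp [clF, h2]
    · have hfr : clF f w pl r = f r := by simp [clF, hpr]
      by_cases hh : f r = "#"
      · by_cases hir : i ≤ r ∧ r < i + w
        · have hcond : clF f w pl i = "*" ∧ r ∈ List.range' i w ∧ clF f w pl r = "#" :=
            ⟨(clF_star_iff f w pl i).2 hstar, by rw [List.mem_range'_1]; omega, by rw [hfr]; exact hh⟩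
          have h2 : pdB f w (pl ++ [i]) r = true := by
            rw [pdB_append, pdB_single]; simp [hh, hstar]; omega
          rw [if_pos hcond]; simp [clF, h2]
        · have hm : ¬ (r ∈ List.range' i w) := by rw [List.mem_range'_1]; omega
          have h2 : pdB f w (pl ++ [i]) r = false := by
            rw [pdB_append, pdB_single]; simp [hpr, hh, hstar]; omega
          rw [if_neg (fun hc => hm hc.2.1)]
          rw [hfr]; simp [clF, h2]
      · have h2 : pdB f w (pl ++ [i]) r = false := by
          rw [pdB_append, pdB_single]; simp [hpr, hh]
        rw [if_neg (fun hc => hh (hfr ▸ hc.2.2))]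
        rw [hfr]; simp [clF, h2]
  · have hns : ¬ (clF f w pl i = "*") := fun hh => hstar ((clF_star_iff f w pl i).1 hh)
    have h2 : pdB f w (pl ++ [i]) r = pdB f w pl r := by
      rw [pdB_append, pdB_single]; simp [hstar]
    rw [if_neg (fun hc => hns hc.1)]
    simp [clF, h2]


lemma cellA_set (bd : List (List String)) (ii j : Nat) (h : cellA bd ii j = "#") (j' r : Nat) :
    cellA (bd.set ii ((bd.getD ii []).set j ".")) r j' = if j' = j ∧ r = ii then "." else cellA bd r j' := by
  have hii := cellA_hash_lt bd ii j h
  have hj : j < (bd.getD ii []).length := by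
    rw [cellA] at h
    by_contra hc
    rw [List.getD_eq_default _ _ (by omega)] at h
    simp at h
  rw [List.getD] at hj
  simp only [cellA, List.getD, List.getElem?_set]
  by_cases hr : ii = r
  · subst hr
    simp only [if_pos trivial, and_true]
    rw [if_pos hii, Option.getD_some, List.getElem?_set]
    by_cases hjj : j = j'
    · subst hjj
      simp [hj]
    · rw [if_neg hjj, if_neg (fun hc : j' = j => hjj (Eq.symm hc))]
  · rw [if_neg hr, if_neg (fun hc : j' = j ∧ r = ii => hr (Eq.symm hc.2))]


lemma innerA_spec (j : Nat) : ∀ (l : List Nat), l.Nodup → ∀ (bd : List (List String)) (res : Int),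
    (∀ r, cellA (innerA j l bd res).1 r j = if r ∈ l ∧ cellA bd r j = "#" then "." else cellA bd r j)
    ∧ (∀ j' r, j' ≠ j → cellA (innerA j l bd res).1 r j' = cellA bd r j')
    ∧ (innerA j l bd res).2 = res + ((l.filter (fun r => cellA bd r j = "#")).length : Int) := by
  intro l
  induction l with
  | nil => intro _ bd res; refine ⟨fun r => by simp [innerA], fun j' r _ => rfl, by simp [innerA]⟩
  | cons ii rest ih =>
    intro hnd bd res
    have hii_rest : ii ∉ rest := (List.nodup_cons.1 hnd).1
    have hnd' : rest.Nodup := (List.nodup_cons.1 hnd).2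
    by_cases h1 : cellA bd ii j = "#"
    · have hstep : innerA j (ii :: rest) bd res
          = innerA j rest (bd.set ii ((bd.getD ii []).set j ".")) (res + 1) := by
        simp [innerA, h1]
      set bd1 := bd.set ii ((bd.getD ii []).set j ".") with hbd1
      have hc1 : ∀ r, cellA bd1 r j = if r = ii then "." else cellA bd r j := by
        intro r
        rw [hbd1, cellA_set bd ii j h1 j r]
        by_cases hri : r = ii <;> simp [hri]
      have hc2 : ∀ j' r, j' ≠ j → cellA bd1 r j' = cellA bd r j' := by
        intro j' r hne
        rw [hbd1, cellA_set bd ii j h1 j' r, if_neg (fun hc => hne hc.1)]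
      obtain ⟨ih1, ih2, ih3⟩ := ih hnd' bd1 (res + 1)
      refine ⟨?_, ?_, ?_⟩
      · intro r
        rw [hstep, ih1 r]
        by_cases hri : r = ii
        · subst hri
          rw [if_neg (fun hc => hii_rest hc.1), hc1 r, if_pos rfl,
            if_pos ⟨List.mem_cons_self, h1⟩]
        · rw [hc1 r, if_neg hri]
          by_cases hm : r ∈ rest ∧ cellA bd r j = "#"
          · rw [if_pos hm, if_pos ⟨List.mem_cons_of_mem _ hm.1, hm.2⟩]
          · rw [if_neg hm, if_neg (fun hc => hm ⟨by
              rcases List.mem_cons.1 hc.1 with h' | h'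
              · exact absurd h' hri
              · exact h', hc.2⟩)]
      · intro j' r hne
        rw [hstep, ih2 j' r hne, hc2 j' r hne]
      · rw [hstep, ih3]
        have hfeq : rest.filter (fun r => cellA bd1 r j = "#")
            = rest.filter (fun r => cellA bd r j = "#") := by
          apply List.filter_congr
          intro r hr
          rw [hc1 r, if_neg (fun hc : r = ii => hii_rest (hc ▸ hr))]
        rw [hfeq, List.filter_cons, if_pos (by simpa using h1)]
        simp only [List.length_cons]
        push_cast
        ring
    · have hstep : innerA j (ii :: rest) bd res = innerA j rest bd res := by
        simp [innerA, h1]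
      obtain ⟨ih1, ih2, ih3⟩ := ih hnd' bd res
      refine ⟨?_, ?_, ?_⟩
      · intro r
        rw [hstep, ih1 r]
        by_cases hm : r ∈ rest ∧ cellA bd r j = "#"
        · rw [if_pos hm, if_pos ⟨List.mem_cons_of_mem _ hm.1, hm.2⟩]
        · rw [if_neg hm, if_neg (fun hc => hm ⟨by
            rcases List.mem_cons.1 hc.1 with h' | h'
            · exact absurd (h' ▸ hc.2) h1
            · exact h', hc.2⟩)]
      · intro j' r hne
        rw [hstep, ih2 j' r hne]
      · rw [hstep, ih3, List.filter_cons, if_neg (by simpa using h1)]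


lemma jLoopA_spec (i w : Nat) : ∀ (jl : List Nat), jl.Nodup → ∀ (bd : List (List String)) (res : Int),
    (∀ j r, cellA (jLoopA i w jl bd res).1 r j =
      if j ∈ jl then stepCell i w (fun r' => cellA bd r' j) r else cellA bd r j)
    ∧ (jLoopA i w jl bd res).2 = res + (jl.map (fun j => stepCnt i w (fun r' => cellA bd r' j))).sum := by
  intro jl
  induction jl with
  | nil => intro _ bd res; exact ⟨fun j r => by simp [jLoopA], by simp [jLoopA]⟩
  | cons j0 rest ih =>
    intro hnd bd res
    have hj0_rest : j0 ∉ rest := (List.nodup_cons.1 hnd).1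
    have hnd' : rest.Nodup := (List.nodup_cons.1 hnd).2
    by_cases hstar : cellA bd i j0 = "*"
    · have hstep : jLoopA i w (j0 :: rest) bd res
          = jLoopA i w rest (innerA j0 (List.range' i w) bd res).1 (innerA j0 (List.range' i w) bd res).2 := by
        simp [jLoopA, hstar]
      obtain ⟨in1, in2, in3⟩ := innerA_spec j0 (List.range' i w) (List.nodup_range') bd res
      set bd2 := (innerA j0 (List.range' i w) bd res).1 with hbd2
      have hfj : ∀ j', j' ≠ j0 → (fun r' => cellA bd2 r' j') = (fun r' => cellA bd r' j') :=
        fun j' hne => funext (fun r => in2 j' r hne)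
      have hstepc : ∀ r, cellA bd2 r j0 = stepCell i w (fun r' => cellA bd r' j0) r := by
        intro r
        rw [in1 r]
        simp only [stepCell]
        by_cases hm : r ∈ List.range' i w ∧ cellA bd r j0 = "#"
        · rw [if_pos hm, if_pos ⟨hstar, hm⟩]
        · rw [if_neg hm, if_neg (fun hc => hm hc.2)]
      obtain ⟨ih1, ih2⟩ := ih hnd' bd2 (innerA j0 (List.range' i w) bd res).2
      refine ⟨?_, ?_⟩
      · intro j r
        rw [hstep, ih1 j r]
        by_cases hj : j ∈ rest
        · have hne : j ≠ j0 := fun hc => hj0_rest (hc ▸ hj)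
          rw [if_pos hj, if_pos (List.mem_cons_of_mem _ hj), hfj j hne]
        · rw [if_neg hj]
          by_cases hjj : j = j0
          · subst hjj
            rw [if_pos List.mem_cons_self, hstepc r]
          · rw [if_neg (fun hc => by
              rcases List.mem_cons.1 hc with h' | h'
              · exact hjj h'
              · exact hj h'), in2 j r hjj]
      · rw [hstep, ih2, in3]
        have hmap : rest.map (fun j => stepCnt i w (fun r' => cellA bd2 r' j))
            = rest.map (fun j => stepCnt i w (fun r' => cellA bd r' j)) := by
          apply List.map_congr_left
          intro j hj
          rw [hfj j (fun hc => hj0_rest (hc ▸ hj))]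
        rw [hmap]
        simp only [List.map_cons, List.sum_cons, stepCnt, if_pos hstar]
        ring
    · have hstep : jLoopA i w (j0 :: rest) bd res = jLoopA i w rest bd res := by
        simp [jLoopA, hstar]
      obtain ⟨ih1, ih2⟩ := ih hnd' bd res
      refine ⟨?_, ?_⟩
      · intro j r
        rw [hstep, ih1 j r]
        by_cases hj : j ∈ rest
        · rw [if_pos hj, if_pos (List.mem_cons_of_mem _ hj)]
        · rw [if_neg hj]
          by_cases hjj : j = j0
          · subst hjj
            rw [if_pos List.mem_cons_self]
            simp only [stepCell]
            rw [if_neg (fun hc => hstar hc.1)]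
          · rw [if_neg (fun hc => by
              rcases List.mem_cons.1 hc with h' | h'
              · exact hjj h'
              · exact hj h')]
      · rw [hstep, ih2]
        simp only [List.map_cons, List.sum_cons, stepCnt, if_neg hstar]
        ring


lemma iLoopA_spec (w m : Nat) : ∀ (il : List Nat) (bd : List (List String)) (res : Int),
    (∀ j r, cellA (iLoopA w m il bd res).1 r j =
      if j ∈ List.range m then colRun w il (fun r' => cellA bd r' j) r else cellA bd r j)
    ∧ (iLoopA w m il bd res).2 = res + ((List.range m).map (fun j => colCnt w il (fun r' => cellA bd r' j))).sum := by
  intro il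
  induction il with
  | nil =>
    intro bd res
    refine ⟨fun j r => by by_cases hj : j ∈ List.range m <;> simp [iLoopA, colRun, hj], by simp [iLoopA, colCnt]⟩
  | cons i rest ih =>
    intro bd res
    obtain ⟨jl1, jl2⟩ := jLoopA_spec i w (List.range m) (List.nodup_range) bd res
    set bd1 := (jLoopA i w (List.range m) bd res).1 with hbd1
    have hstep : iLoopA w m (i :: rest) bd res
        = iLoopA w m rest bd1 (jLoopA i w (List.range m) bd res).2 := rfl
    have hfun : ∀ j, j ∈ List.range m →
        (fun r' => cellA bd1 r' j) = stepCell i w (fun r' => cellA bd r' j) :=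
      fun j hj => funext (fun r => by rw [jl1 j r, if_pos hj])
    have hfun' : ∀ j, j ∉ List.range m → (fun r' => cellA bd1 r' j) = (fun r' => cellA bd r' j) :=
      fun j hj => funext (fun r => by rw [jl1 j r, if_neg hj])
    obtain ⟨ih1, ih2⟩ := ih bd1 (jLoopA i w (List.range m) bd res).2
    refine ⟨?_, ?_⟩
    · intro j r
      rw [hstep, ih1 j r]
      by_cases hj : j ∈ List.range m
      · rw [if_pos hj, if_pos hj, hfun j hj]
        rfl
      · rw [if_neg hj, if_neg hj]
        exact congrFun (hfun' j hj) r
    · rw [hstep, ih2, jl2]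
      have hmap : (List.range m).map (fun j => colCnt w rest (fun r' => cellA bd1 r' j))
          = (List.range m).map (fun j => colCnt w rest (stepCell i w (fun r' => cellA bd r' j))) :=
        List.map_congr_left (fun j hj => by rw [hfun j hj])
      rw [hmap, add_assoc]
      congr 1
      have := PySem.List.sum_map_add_int (List.range m)
        (fun j => stepCnt i w (fun r' => cellA bd r' j))
        (fun j => colCnt w rest (stepCell i w (fun r' => cellA bd r' j)))
      rw [← this]
      rfl


lemma pdB_nil (f : Nat → String) (w : Nat) (r : Nat) : pdB f w [] r = false := by simp [pdB]
lemma clF_nil (f : Nat → String) (w : Nat) : clF f w [] = f := by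
  funext r; simp [clF, pdB_nil]
lemma clF_hash_iff (f : Nat → String) (w : Nat) (pl : List Nat) (r : Nat) :
    clF f w pl r = "#" ↔ (f r = "#" ∧ pdB f w pl r = false) := by
  unfold clF
  by_cases hp : pdB f w pl r = true
  · simp [hp]
  · simp [hp]

lemma chain_pairwise_filter (s n : Nat) (p : Nat → Bool) : ((List.range' s n).filter p).Pairwise (· < ·) :=
  (List.pairwise_lt_range').sublist List.filter_sublist
lemma chain_pairwise_filter_range (n : Nat) (p : Nat → Bool) : ((List.range n).filter p).Pairwise (· < ·) :=
  (List.pairwise_lt_range).sublist List.filter_sublist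

lemma colCnt_clF (w n : Nat) (f : Nat → String) (hn : ∀ r, f r = "#" → r < n) :
    ∀ (il pl : List Nat), colCnt w il (clF f w pl) =
      (((List.range n).filter (fun r => pdB f w (pl ++ il) r && !pdB f w pl r)).length : Int) := by
  intro il
  induction il with
  | nil =>
    intro pl
    have : (List.range n).filter (fun r => pdB f w (pl ++ []) r && !pdB f w pl r) = [] := by
      apply List.filter_eq_nil_iff.2
      intro r _
      simp
    rw [this]
    simp [colCnt]
  | cons i rest ih =>
    intro pl
    have hcc : colCnt w (i :: rest) (clF f w pl)
        = stepCnt i w (clF f w pl) + colCnt w rest (clF f w (pl ++ [i])) := by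
      rw [colCnt, stepCell_clF]
    rw [hcc, ih (pl ++ [i])]
    have hPL : (pl ++ [i]) ++ rest = pl ++ (i :: rest) := by simp
    rw [hPL]
    by_cases hstar : f i = "*"
    · have hsc : stepCnt i w (clF f w pl)
          = (((List.range' i w).filter (fun r => clF f w pl r = "#")).length : Int) := by
        rw [stepCnt, if_pos ((clF_star_iff f w pl i).2 hstar)]
      have hlist : (List.range' i w).filter (fun r => clF f w pl r = "#")
          = (List.range n).filter (fun r => pdB f w (pl ++ [i]) r && !pdB f w pl r) := by
        apply chain_eq_of_mem_iff _ _ (chain_pairwise_filter _ _ _) (chain_pairwise_filter_range _ _)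
        intro x
        simp only [List.mem_filter, List.mem_range'_1, List.mem_range, clF_hash_iff,
          pdB_append, pdB_single, decide_eq_true_eq]
        constructor
        · rintro ⟨⟨hx1, hx2⟩, hx3, hx4⟩
          refine ⟨hn x hx3, ?_⟩
          simp only [hx4, Bool.false_or, Bool.not_false, Bool.and_true]
          simp [hx3, hstar]
          omega
        · rintro ⟨hx1, hx2⟩
          rcases Bool.and_eq_true_iff.1 hx2 with ⟨ha, hb⟩
          have hnp : pdB f w pl x = false := by
            cases hq : pdB f w pl x
            · rfl
            · rw [hq] at hb; simp at hb
          rw [hnp] at ha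
          simp only [Bool.false_or] at ha
          simp [hstar] at ha
          refine ⟨⟨?_, ?_⟩, ?_, hnp⟩ <;> simp [ha]
      rw [hsc, hlist]
      have hsplit : (((List.range n).filter (fun r => pdB f w (pl ++ (i :: rest)) r && !pdB f w pl r)).length)
          = (((List.range n).filter (fun r => pdB f w (pl ++ [i]) r && !pdB f w pl r)).length)
          + (((List.range n).filter (fun r => pdB f w (pl ++ (i :: rest)) r && !pdB f w (pl ++ [i]) r)).length) := by
        apply length_filter_disjoint
        intro x _
        have h1 : pdB f w (pl ++ (i :: rest)) x = (pdB f w (pl ++ [i]) x || pdB f w rest x) := by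
          rw [← hPL, pdB_append]
        have h2 : pdB f w (pl ++ [i]) x = (pdB f w pl x || pdB f w [i] x) := pdB_append _ _ _ _ _
        rw [h1, h2]
        cases pdB f w pl x <;> cases pdB f w [i] x <;> cases pdB f w rest x <;> simp
      rw [hsplit]
      push_cast
      ring
    · have hsc : stepCnt i w (clF f w pl) = 0 := by
        rw [stepCnt, if_neg (fun hc => hstar ((clF_star_iff f w pl i).1 hc))]
      have hpd : ∀ r, pdB f w (pl ++ [i]) r = pdB f w pl r := by
        intro r
        rw [pdB_append, pdB_single]
        simp [hstar]
      have hfe : (List.range n).filter (fun r => pdB f w (pl ++ (i :: rest)) r && !pdB f w (pl ++ [i]) r)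
          = (List.range n).filter (fun r => pdB f w (pl ++ (i :: rest)) r && !pdB f w pl r) := by
        apply List.filter_congr
        intro r _
        rw [hpd r]
      rw [hsc, hfe]
      ring


lemma colCnt_total (w : Nat) (bd : List (List String)) (j : Nat) :
    colCnt w (List.range bd.length) (fun r => cellA bd r j) =
      (((List.range bd.length).filter
        (fun r => pdB (fun r' => cellA bd r' j) w (List.range bd.length) r)).length : Int) := by
  have hn : ∀ r, cellA bd r j = "#" → r < bd.length := fun r h => cellA_hash_lt bd r j h
  have h0 := colCnt_clF w bd.length (fun r' => cellA bd r' j) hn (List.range bd.length) []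
  rw [clF_nil] at h0
  rw [h0]
  congr 2
  apply List.filter_congr
  intro r _
  rw [pdB_nil]
  simp

lemma invB_ext (bd : List (List String)) (j : Nat) (last : Int) (k : Nat)
    (h : invB bd j last k) (hk : cellA bd k j ≠ "*") : invB bd j last (k + 1) := by
  rcases h with ⟨h1, h2⟩ | ⟨i0, h1, h2, h3, h4⟩
  · exact Or.inl ⟨h1, fun i hi => by
      rcases Nat.lt_succ_iff_lt_or_eq.1 hi with h' | h'
      · exact h2 i h'
      · exact h' ▸ hk⟩
  · exact Or.inr ⟨i0, by omega, h2, h3, fun i hi hik => by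
      rcases Nat.lt_succ_iff_lt_or_eq.1 hik with h' | h'
      · exact h4 i hi h'
      · exact h' ▸ hk⟩

lemma colLoopB_spec (bd : List (List String)) (move : Int) (j : Nat) :
    ∀ (t k : Nat) (last res : Int), invB bd j last k →
      colLoopB bd move j (List.range' k t) last res =
        res + (((List.range' k t).filter (qB bd move j)).length : Int) := by
  intro t
  induction t with
  | zero => intro k last res _; simp [colLoopB]
  | succ t ih =>
    intro k last res hinv
    rw [List.range'_succ]
    by_cases hc : cellA bd k j = "*"
    · have hstep : colLoopB bd move j (k :: List.range' (k + 1) t) last res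
          = colLoopB bd move j (List.range' (k + 1) t) (k : Int) res := by
        simp only [colLoopB]
        rw [if_pos (show (bd.getD k []).getD j "" = "*" from hc)]
      have hinv' : invB bd j (k : Int) (k + 1) :=
        Or.inr ⟨k, by omega, hc, rfl, fun i h1 h2 => by omega⟩
      have hq : qB bd move j k = false := by
        simp [qB, hc]
      rw [hstep, ih (k + 1) (k : Int) res hinv', List.filter_cons, if_neg (by simp [hq])]
    · by_cases hcnt : cellA bd k j = "#" ∧ 0 ≤ last ∧ (k : Int) - last < move
      · have hstep : colLoopB bd move j (k :: List.range' (k + 1) t) last res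
            = colLoopB bd move j (List.range' (k + 1) t) last (res + 1) := by
          simp only [colLoopB]
          rw [if_neg (show ¬ (bd.getD k []).getD j "" = "*" from hc),
            if_pos (show (bd.getD k []).getD j "" = "#" ∧ 0 ≤ last ∧ (k : Int) - last < move from hcnt)]
        obtain ⟨hh1, hh2, hh3⟩ := hcnt
        have hq : qB bd move j k = true := by
          rcases hinv with ⟨h1, _⟩ | ⟨i0, h1, h2, h3, _⟩
          · omega
          · simp only [qB]
            refine Bool.and_eq_true_iff.2 ⟨by simp [hh1], ?_⟩
            simp only [List.any_eq_true, List.mem_range]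
            exact ⟨i0, by omega, by simp [h2]; omega⟩
        rw [hstep, ih (k + 1) last (res + 1) (invB_ext bd j last k hinv hc), List.filter_cons,
          if_pos hq]
        simp only [List.length_cons]
        push_cast
        ring
      · have hstep : colLoopB bd move j (k :: List.range' (k + 1) t) last res
            = colLoopB bd move j (List.range' (k + 1) t) last res := by
          simp only [colLoopB]
          rw [if_neg (show ¬ (bd.getD k []).getD j "" = "*" from hc),
            if_neg (show ¬ ((bd.getD k []).getD j "" = "#" ∧ 0 ≤ last ∧ (k : Int) - last < move) from hcnt)]
        have hq : qB bd move j k = false := by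
          by_cases hh : cellA bd k j = "#"
          · simp only [qB]
            rw [Bool.and_eq_false_iff]
            right
            rw [List.any_eq_false]
            intro i hi
            simp only [List.mem_range] at hi
            rcases hinv with ⟨h1, h2⟩ | ⟨i0, h1, h2, h3, h4⟩
            · by_cases hik : i = k
              · simp [hik, hh]
              · simp [h2 i (by omega)]
            · by_cases his : cellA bd i j = "*"
              · have hik : i ≠ k := fun hc' => hc (hc' ▸ his)
                have hle : i ≤ i0 := by
                  by_contra hgt
                  exact h4 i (by omega) (by omega) his
                simp only [his, beq_self_eq_true, Bool.true_and]
                have h5 : ¬ (0 ≤ last ∧ (k : Int) - last < move) := fun hx => hcnt ⟨hh, hx⟩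
                have : ¬ ((k : Int) - i < move) := by omega
                simpa using this
              · simp [his]
          · simp [qB, hh]
        rw [hstep, ih (k + 1) last res (invB_ext bd j last k hinv hc), List.filter_cons,
          if_neg (by simp [hq])]

lemma jLoopB_spec (bd : List (List String)) (move : Int) (n : Nat) :
    ∀ (jl : List Nat) (res : Int),
    jLoopB bd move n jl res =
      res + (jl.map (fun j => (((List.range n).filter (qB bd move j)).length : Int))).sum := by
  intro jl
  induction jl with
  | nil => intro res; simp [jLoopB]
  | cons j rest ih =>
    intro res
    have hcol : colLoopB bd move j (List.range n) (-1) res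
        = res + (((List.range n).filter (qB bd move j)).length : Int) := by
      rw [List.range_eq_range']
      exact colLoopB_spec bd move j n 0 (-1) res (Or.inl ⟨rfl, by omega⟩)
    rw [jLoopB, ih, hcol]
    simp only [List.map_cons, List.sum_cons]
    ring

lemma moveLoopA_shift (bd : List (List String)) : ∀ (l : List Nat) (m0 : Nat),
    moveLoopA bd l m0 = m0 + moveLoopA bd l 0 := by
  intro l
  induction l with
  | nil => intro m0; simp [moveLoopA]
  | cons i rest ih =>
    intro m0
    by_cases h : "*" ∈ bd.getD i []
    · simp only [moveLoopA, if_pos h]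
    · simp only [moveLoopA, if_neg h]
      rw [ih (m0 + 1), ih 1]
      omega

lemma lastStarB_spec : ∀ (l : List (Int × List String)) (last : Int),
    lastStarB l last = (match l.reverse.find? (fun p => "*" ∈ p.2) with
      | some p => p.1 | none => last) := by
  intro l
  induction l with
  | nil => intro last; simp [lastStarB]
  | cons p rest ih =>
    intro last
    rw [lastStarB, ih]
    rw [List.reverse_cons, List.find?_append]
    cases hf : rest.reverse.find? (fun p => "*" ∈ p.2) with
    | some y => simp
    | none => by_cases hp : "*" ∈ p.2 <;> simp [hp]

lemma moveA_find (bd : List (List String)) : ∀ (n : Nat),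
    moveLoopA bd (List.range n).reverse 0 =
      (match (List.range n).reverse.find? (fun i => "*" ∈ bd.getD i []) with
        | some i => n - i | none => n) := by
  intro n
  induction n with
  | zero => simp [moveLoopA]
  | succ n ih =>
    have hrev : (List.range (n + 1)).reverse = n :: (List.range n).reverse := by
      rw [List.range_succ, List.reverse_append]
      rfl
    rw [hrev]
    by_cases h : "*" ∈ bd.getD n []
    · rw [moveLoopA, if_pos h]
      rw [List.find?_cons_of_pos (by simpa using h)]
      simp
    · rw [moveLoopA, if_neg h, moveLoopA_shift bd _ 1, ih]
      rw [List.find?_cons_of_neg (by simpa using h)]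
      cases hf : (List.range n).reverse.find? (fun i => "*" ∈ bd.getD i []) with
      | some i =>
        have : i ∈ (List.range n).reverse := List.mem_of_find?_eq_some hf
        simp only [List.mem_reverse, List.mem_range] at this
        show 1 + (n - i) = n + 1 - i
        omega
      | none =>
        show 1 + n = n + 1
        omega

lemma enumerate_getD (bd : List (List String)) :
    PySem.List.enumerate bd 0 = (List.range bd.length).map (fun (i : Nat) => ((i : Int), bd.getD i [])) := by
  rw [PySem.List.enumerate_eq_map_pyRange (xs := bd) (d := ([] : List String))]
  rw [PySem.List.len_eq, PySem.List.pyRange_zero_natCast]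
  rw [List.map_map]
  apply List.map_congr_left
  intro i _
  simp [PySem.List.pyGetD_natCast, List.getD]

lemma move_eq (bd : List (List String)) :
    (if 0 ≤ lastStarB (PySem.List.enumerate bd 0) (-1)
      then (bd.length : Int) - lastStarB (PySem.List.enumerate bd 0) (-1) else (bd.length : Int))
    = ((moveLoopA bd (List.range bd.length).reverse 0 : Nat) : Int) := by
  rw [moveA_find bd bd.length]
  rw [lastStarB_spec, enumerate_getD]
  rw [← List.map_reverse, List.find?_map]
  cases hf : (List.range bd.length).reverse.find? (fun i => "*" ∈ bd.getD i []) with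
  | some i =>
    have hi : i < bd.length := by
      have := List.mem_of_find?_eq_some hf
      simp only [List.mem_reverse, List.mem_range] at this
      exact this
    have hcomp : (List.range bd.length).reverse.find?
        ((fun p => decide ("*" ∈ p.2)) ∘ (fun (i : Nat) => ((i : Int), bd.getD i []))) = some i := by
      rw [show ((fun (p : Int × List String) => decide ("*" ∈ p.2)) ∘ (fun (i : Nat) => ((i : Int), bd.getD i [])))
          = (fun i => decide ("*" ∈ bd.getD i [])) from rfl]
      exact hf
    rw [hcomp]
    simp only [Option.map_some]
    rw [if_pos (by positivity)]
    push_cast [Nat.cast_sub (le_of_lt hi)]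
    ring
  | none =>
    have hcomp : (List.range bd.length).reverse.find?
        ((fun p => decide ("*" ∈ p.2)) ∘ (fun (i : Nat) => ((i : Int), bd.getD i []))) = none := by
      rw [show ((fun (p : Int × List String) => decide ("*" ∈ p.2)) ∘ (fun (i : Nat) => ((i : Int), bd.getD i [])))
          = (fun i => decide ("*" ∈ bd.getD i [])) from rfl]
      exact hf
    rw [hcomp]
    simp only [Option.map_none]
    rw [if_neg (by omega)]

lemma pd_eq_qB (bd : List (List String)) (w : Nat) (j : Nat) (r : Nat) (hr : r < bd.length) :
    pdB (fun r' => cellA bd r' j) w (List.range bd.length) r = qB bd ((w : Nat) : Int) j r := by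
  by_cases hh : cellA bd r j = "#"
  · have hiff : ((List.range bd.length).any
        (fun i => cellA bd i j == "*" && decide (i ≤ r) && decide (r < i + w)) = true)
        ↔ ((List.range (r + 1)).any
        (fun i => cellA bd i j == "*" && decide ((r : Int) - i < (w : Int))) = true) := by
      simp only [List.any_eq_true, List.mem_range, Bool.and_eq_true, beq_iff_eq,
        decide_eq_true_eq]
      constructor
      · rintro ⟨i, hi, ⟨hs, h1⟩, h2⟩
        exact ⟨i, by omega, hs, by omega⟩
      · rintro ⟨i, hi, hs, h2⟩
        exact ⟨i, by omega, ⟨hs, by omega⟩, by omega⟩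
    unfold pdB qB
    cases h1 : (List.range bd.length).any
        (fun i => (fun r' => cellA bd r' j) i == "*" && decide (i ≤ r) && decide (r < i + w)) with
    | true =>
      have h2 := hiff.1 h1
      rw [h2]
    | false =>
      have h2 : (List.range (r + 1)).any
          (fun i => cellA bd i j == "*" && decide ((r : Int) - i < (w : Nat))) = false := by
        cases h3 : (List.range (r + 1)).any
            (fun i => cellA bd i j == "*" && decide ((r : Int) - i < (w : Nat))) with
        | false => rfl
        | true => rw [hiff.2 h3] at h1; exact h1
      rw [h2]
  · unfold pdB qB
    have hb : (cellA bd r j == "#") = false := by simp [hh]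
    rw [hb]
    simp

-- ===== VERDICT (by name: the statement is the Claim_ definition above) =====
theorem dropBlock2_spec : Claim_equal_dropBlock2 := by
  intro board _ _
  show dropBlock2 board = dropBlock2_alt board
  have hA : dropBlock2 board
      = ((List.range (board.headD []).length).map
          (fun j => colCnt (moveLoopA board (List.range board.length).reverse 0)
            (List.range board.length) (fun r' => cellA board r' j))).sum := by
    show (iLoopA (moveLoopA board (List.range board.length).reverse 0) (board.headD []).length
        (List.range board.length) board 0).2 = _
    rw [(iLoopA_spec _ _ _ board 0).2]
    ring
  have hB : dropBlock2_alt board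
      = ((List.range (board.headD []).length).map
          (fun j => (((List.range board.length).filter
            (qB board ((moveLoopA board (List.range board.length).reverse 0 : Nat) : Int) j)).length : Int))).sum := by
    show jLoopB board
        (if 0 ≤ lastStarB (PySem.List.enumerate board 0) (-1)
          then ((board.length : Int) - lastStarB (PySem.List.enumerate board 0) (-1))
          else (board.length : Int))
        board.length (List.range (board.headD []).length) 0 = _
    rw [move_eq board, jLoopB_spec]
    ring
  rw [hA, hB]
  congr 1
  apply List.map_congr_left
  intro j _
  rw [colCnt_total, List.filter_congr
    (fun r hr => pd_eq_qB board (moveLoopA board (List.range board.length).reverse 0) j r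
      (List.mem_range.1 hr))]
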